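-- pv_equiv track=rewrite | github.com/kalletolonen/tira1 | ex5/swapmove.py | solve
-- ===== SOURCE A (Python) =====
-- def solve(t):
--     commands = []
--     sorted_data = list(range(1, len(t) + 1))
--
--     if t == sorted_data:
--         return commands
--
--     if len(t) == 2:
--         t[0], t[1] = t[1], t[0]
--         commands.append("SWAP")
--         return commands
--
--     while t != sorted(t):
--         if t[0] > t[1]:
--             t.append(t[0])
--             t.pop(0)
--             commands.append("MOVE")
--         else:
--             for i in range(1, len(t)):
--                 if t[i] < t[i - 1]:
--                     t[i], t[i - 1] = t[i - 1], t[i]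
--                     commands.append("SWAP")
--                     break
--
--     return commands
-- ===== SOURCE B (Python) =====
-- # B: simulate the same SWAP/MOVE process without re-sorting or pop(0):
-- # a head pointer turns the front-rotation into O(1) amortized, and a resume
-- # pointer restarts the descent scan where it can next appear instead of at 1.
-- # Equivalence with A is about the RETURN VALUE only: A sorts its argument in
-- # place, B leaves it untouched.
--
-- def _descent_from(s, head, i):
--     """Smallest j >= i with s[head+j] < s[head+j-1] (indices relative to s[head:]), else None."""
--     n = len(s)
--     while head + i < n:
--         if s[head + i] < s[head + i - 1]:
--             return i
--         i += 1
--     return None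
--
-- def solve(t):
--     s = list(t)
--     j = _descent_from(s, 0, 1)
--     if j is None:
--         return []
--     if len(s) == 2:
--         return ["SWAP"]
--     commands = []
--     head = 0
--     while j is not None:
--         if j == 1:
--             s.append(s[head])
--             head += 1
--             commands.append("MOVE")
--             j = _descent_from(s, head, 1)
--         else:
--             a = head + j
--             s[a - 1], s[a] = s[a], s[a - 1]
--             commands.append("SWAP")
--             j = _descent_from(s, head, j - 1)
--     return commands
-- ===== Notes on version B (the rewrite author's own statement) =====
-- stated objective: faster
-- what changed: B simulates the same SWAP/MOVE command sequence but drops A's per-iteration sorted(t) comparison, O(n) pop(0) and from-scratch descent scan: a head pointer makes the rotation O(1) amortized and a resume pointer restarts the descent scan where a new descent can first appear.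
-- intended difference: On sorted two-element lists other than [1,2] (e.g. [1,3] or [2,2]) A's unconditional length-2 branch returns ["SWAP"] although the list is already in order; B returns the intended empty command list (on [1,2] itself both A and B return the empty command list). — e.g. on solve([1, 3]): A returns ["SWAP"], B returns []
import Mathlib
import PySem

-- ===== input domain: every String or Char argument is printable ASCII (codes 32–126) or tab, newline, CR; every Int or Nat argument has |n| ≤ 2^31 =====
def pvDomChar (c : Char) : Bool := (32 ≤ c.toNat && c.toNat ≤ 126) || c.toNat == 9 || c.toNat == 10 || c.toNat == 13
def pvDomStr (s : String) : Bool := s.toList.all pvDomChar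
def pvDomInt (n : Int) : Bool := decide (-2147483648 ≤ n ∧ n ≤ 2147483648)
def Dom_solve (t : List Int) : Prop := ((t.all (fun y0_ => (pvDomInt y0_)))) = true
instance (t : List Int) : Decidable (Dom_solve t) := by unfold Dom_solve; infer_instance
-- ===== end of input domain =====

-- B replaces A's per-iteration re-sort, front pop and from-scratch descent scan by a head pointer
-- and a resume pointer (objective: faster).  A sorts its argument in place; B leaves it untouched:
-- the equivalence proved here is about the RETURN value only.
-- The while-loop ports carry a fuel counter as a totality guard (one unit per loop iteration);
-- with equal fuel the two ports are proved to agree for EVERY fuel value.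

-- ===== PORT A =====
-- the inner `for i in range(1, len(t))` of A up to its `break`: first i ≥ start with
-- t[i] < t[i-1] (rem is the remaining scan length, a structural totality guard)
def innerAGo (t : List Int) : Nat → Nat → Option Nat
  | _, 0 => none
  | start, rem + 1 =>
    if start < t.length then
      if t.getD start 0 < t.getD (start - 1) 0 then some start else innerAGo t (start + 1) rem
    else none

def innerA (t : List Int) (start : Nat) : Option Nat := innerAGo t start (t.length - start)

-- fuel guard for the while-loops (comfortably above the ~len²/2 iterations the loop performs)
def fuelGuard (t : List Int) : Nat := (t.length + 1) ^ 3

def loopA : Nat → List Int → List String → List String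
  | 0, _, commands => commands
  | fuel + 1, t, commands =>
    if t = PySem.List.sorted t (fun x => x) false then commands
    else if t.getD 0 0 > t.getD 1 0 then
      -- t.append(t[0]); t.pop(0)
      loopA fuel ((t ++ [t.getD 0 0]).tail) (commands ++ ["MOVE"])
    else
      match innerA t 1 with
      | some i => loopA fuel ((t.set (i - 1) (t.getD i 0)).set i (t.getD (i - 1) 0)) (commands ++ ["SWAP"])
      | none => loopA fuel t commands   -- for-loop falls through without break; while re-tests

def solve (t : List Int) : List String :=
  let sorted_data := PySem.List.pyRange 1 ((t.length : Int) + 1) 1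
  if t = sorted_data then []
  else if t.length = 2 then ["SWAP"]
  else loopA (fuelGuard t) t []

-- ===== PORT B =====
-- _descent_from(s, head, i): first j ≥ i with s[head+j] < s[head+j-1], else none
-- (rem is the remaining scan length, a structural totality guard)
def descentFromGo (s : List Int) (head : Nat) : Nat → Nat → Option Nat
  | _, 0 => none
  | i, rem + 1 =>
    if head + i < s.length then
      if s.getD (head + i) 0 < s.getD (head + i - 1) 0 then some i else descentFromGo s head (i + 1) rem
    else none

def descentFrom (s : List Int) (head i : Nat) : Option Nat :=
  descentFromGo s head i (s.length - (head + i))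

def loopB : Nat → List Int → Nat → Option Nat → List String → List String
  | 0, _, _, _, commands => commands
  | fuel + 1, s, head, j?, commands =>
    match j? with
    | none => commands
    | some j =>
      if j = 1 then
        let s' := s ++ [s.getD head 0]
        loopB fuel s' (head + 1) (descentFrom s' (head + 1) 1) (commands ++ ["MOVE"])
      else
        let a := head + j
        let s' := (s.set (a - 1) (s.getD a 0)).set a (s.getD (a - 1) 0)
        loopB fuel s' head (descentFrom s' head (j - 1)) (commands ++ ["SWAP"])

def solve_alt (t : List Int) : List String :=
  match descentFrom t 0 1 with
  | none => []
  | some j => if t.length = 2 then ["SWAP"] else loopB (fuelGuard t) t 0 (some j) []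

-- ===== PRECONDITION & SPEC =====
-- On sorted two-element lists other than [1,2] A returns ["SWAP"] (its length-2 branch swaps
-- unconditionally) although the list is already in order; B returns the intended empty command
-- list (on [1,2] itself both A and B return the empty command list).
def D_solve (t : List Int) : Prop :=
  t.length = 2 ∧ t.getD 0 0 ≤ t.getD 1 0 ∧ t ≠ [1, 2]
instance (t : List Int) : Decidable (D_solve t) := by unfold D_solve; infer_instance

def Spec_solve (t : List Int) (out : List String) : Prop := ¬ D_solve t → out = solve_alt t
instance (t : List Int) (out : List String) : Decidable (Spec_solve t out) := by unfold Spec_solve; infer_instance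

def pvDiffWitness_solve : List Int := [1, 3]
def pvDiffWitnessOut_solve : (List String) × (List String) := (["SWAP"], [])

-- ===== CLAIM (what is proved, stated in full; the proofs are below) =====
def Claim_unchanged_solve : Prop := ∀ (t : List Int), Dom_solve t → Spec_solve t (solve t)
def Claim_changed_solve : Prop := Dom_solve (pvDiffWitness_solve) ∧ D_solve (pvDiffWitness_solve) ∧ solve (pvDiffWitness_solve) = pvDiffWitnessOut_solve.1 ∧ solve_alt (pvDiffWitness_solve) = pvDiffWitnessOut_solve.2 ∧ pvDiffWitnessOut_solve.1 ≠ pvDiffWitnessOut_solve.2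
def Claim_exact_solve : Prop := ∀ (t : List Int), Dom_solve t → D_solve t → solve t ≠ solve_alt t

-- ===== LEMMAS AND PROOFS =====

-- "no adjacent descent at positions start ≤ j < stop"
def NoDesc (t : List Int) (start stop : Nat) : Prop :=
  ∀ j, start ≤ j → j < stop → ¬ (t.getD j 0 < t.getD (j - 1) 0)

theorem innerA_eq (t : List Int) (start : Nat) :
    innerA t start =
      if start < t.length then
        if t.getD start 0 < t.getD (start - 1) 0 then some start else innerA t (start + 1)
      else none := by
  unfold innerA
  rcases h : t.length - start with _ | rem
  · have h' : ¬ start < t.length := by omega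
    simp [innerAGo, h']
  · have h' : start < t.length := by omega
    have h2 : t.length - (start + 1) = rem := by omega
    simp [innerAGo, h', h2]

theorem innerA_none_iff (t : List Int) (start : Nat) :
    innerA t start = none ↔ NoDesc t start t.length := by
  have key : ∀ rem start, rem = t.length - start →
      (innerA t start = none ↔ NoDesc t start t.length) := by
    intro rem
    induction rem with
    | zero =>
      intro start h
      rw [innerA_eq]
      have h' : ¬ start < t.length := by omega
      simp only [h', if_false]
      constructor
      · intro _ j hj1 hj2; omega
      · intro _; trivial
    | succ rem ih =>
      intro start h
      have h' : start < t.length := by omega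
      rw [innerA_eq]
      simp only [h', if_true]
      by_cases hd : t.getD start 0 < t.getD (start - 1) 0
      · simp only [hd, if_true]
        constructor
        · intro hc; exact absurd hc (by simp)
        · intro hnd; exact absurd hd (hnd start le_rfl h')
      · simp only [hd, if_false]
        rw [ih (start + 1) (by omega)]
        constructor
        · intro hnd j hj1 hj2
          rcases Nat.eq_or_lt_of_le hj1 with rfl | hlt
          · exact hd
          · exact hnd j hlt hj2
        · intro hnd j hj1 hj2; exact hnd j (by omega) hj2
  exact key _ start rfl

theorem innerA_some (t : List Int) (start j : Nat) (h : innerA t start = some j) :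
    start ≤ j ∧ j < t.length ∧ t.getD j 0 < t.getD (j - 1) 0 ∧ NoDesc t start j := by
  have key : ∀ rem start, rem = t.length - start → innerA t start = some j →
      start ≤ j ∧ j < t.length ∧ t.getD j 0 < t.getD (j - 1) 0 ∧ NoDesc t start j := by
    intro rem
    induction rem with
    | zero =>
      intro start hr hs
      rw [innerA_eq] at hs
      have h' : ¬ start < t.length := by omega
      simp [h'] at hs
    | succ rem ih =>
      intro start hr hs
      have h' : start < t.length := by omega
      rw [innerA_eq] at hs
      simp only [h', if_true] at hs
      by_cases hd : t.getD start 0 < t.getD (start - 1) 0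
      · simp only [hd, if_true, Option.some.injEq] at hs
        subst hs
        exact ⟨le_rfl, h', hd, fun k hk1 hk2 => by omega⟩
      · simp only [hd, if_false] at hs
        obtain ⟨h1, h2, h3, h4⟩ := ih (start + 1) (by omega) hs
        refine ⟨by omega, h2, h3, ?_⟩
        intro k hk1 hk2
        rcases Nat.eq_or_lt_of_le hk1 with rfl | hlt
        · exact hd
        · exact h4 k hlt hk2
  exact key _ start rfl h

theorem innerA_skip (t : List Int) (i p : Nat) (hip : i ≤ p) (hnd : NoDesc t i p) :
    innerA t i = innerA t p := by
  induction p, hip using Nat.le_induction with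
  | base => rfl
  | succ p hp ih =>
    have step : innerA t p = innerA t (p + 1) := by
      rw [innerA_eq (t := t) (start := p)]
      by_cases h' : p < t.length
      · rw [if_pos h', if_neg (hnd p hp (by omega))]
      · rw [if_neg h', innerA_eq (t := t) (start := p + 1), if_neg (by omega)]
    rw [ih (fun j hj1 hj2 => hnd j hj1 (by omega)), step]

theorem getD_drop (s : List Int) (head k : Nat) (_h : head + k < s.length) :
    (s.drop head).getD k 0 = s.getD (head + k) 0 := by
  simp [List.getD_eq_getElem?_getD, List.getElem?_drop]

theorem descentFrom_eq_innerA (s : List Int) (head i : Nat) (hi : 1 ≤ i) :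
    descentFrom s head i = innerA (s.drop head) i := by
  have key : ∀ rem i, 1 ≤ i → rem = s.length - (head + i) →
      descentFromGo s head i rem = innerA (s.drop head) i := by
    intro rem
    induction rem with
    | zero =>
      intro i h1 hr
      have h' : ¬ i < (s.drop head).length := by
        rw [List.length_drop]; omega
      rw [innerA_eq, if_neg h']
      rfl
    | succ rem ih =>
      intro i h1 hr
      have h' : head + i < s.length := by omega
      have h'' : i < (s.drop head).length := by
        rw [List.length_drop]; omega
      have e1 : (s.drop head).getD i 0 = s.getD (head + i) 0 := getD_drop s head i h'
      have e2 : (s.drop head).getD (i - 1) 0 = s.getD (head + i - 1) 0 := by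
        have hm : head + i - 1 = head + (i - 1) := by omega
        rw [hm, getD_drop s head (i - 1) (by omega)]
      rw [innerA_eq, if_pos h'', e1, e2]
      show (if head + i < s.length then
          if s.getD (head + i) 0 < s.getD (head + i - 1) 0 then some i
          else descentFromGo s head (i + 1) rem
        else none) = _
      rw [if_pos h']
      by_cases hd : s.getD (head + i) 0 < s.getD (head + i - 1) 0
      · rw [if_pos hd, if_pos hd]
      · rw [if_neg hd, if_neg hd]
        exact ih (i + 1) (by omega) (by omega)
  unfold descentFrom
  exact key _ i hi rfl

theorem drop_set_of_le (l : List Int) (n m : Nat) (v : Int) (h : m ≤ n) :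
    (l.set n v).drop m = (l.drop m).set (n - m) v := by
  apply List.ext_getElem?
  intro i
  simp only [List.getElem?_set, List.getElem?_drop, List.length_drop]
  split_ifs <;> first | rfl | omega

theorem noDesc_iff_pairwise (t : List Int) :
    NoDesc t 1 t.length ↔ t.Pairwise (· ≤ ·) := by
  rw [← List.isChain_iff_pairwise, List.isChain_iff_getElem]
  constructor
  · intro hnd i h
    have := hnd (i + 1) (by omega) h
    simp only [List.getD_eq_getElem?_getD, Nat.add_sub_cancel,
      List.getElem?_eq_getElem (by omega : i < t.length),
      List.getElem?_eq_getElem h, Option.getD_some] at this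
    omega
  · intro hc j hj1 hj2
    obtain ⟨i, rfl⟩ : ∃ i, j = i + 1 := ⟨j - 1, by omega⟩
    have hle := hc i (by omega)
    simp only [Nat.add_sub_cancel, List.getD_eq_getElem?_getD,
      List.getElem?_eq_getElem (by omega : i + 1 < t.length),
      List.getElem?_eq_getElem (by omega : i < t.length), Option.getD_some]
    exact not_lt.mpr hle

theorem sorted_self_iff (t : List Int) :
    t = PySem.List.sorted t (fun x => x) false ↔ innerA t 1 = none := by
  rw [innerA_none_iff, noDesc_iff_pairwise]
  constructor
  · intro h
    have := PySem.List.sorted_pairwise (xs := t) (key := fun x : Int => x)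
    rw [← h] at this
    exact this
  · intro h
    exact (PySem.List.sorted_eq_self_of_pairwise t (fun x => x) h).symm

-- the main loop correspondence: with the scan-resume invariant, B's loop equals A's, fuel for fuel
theorem loop_eq (fuel : Nat) : ∀ (s : List Int) (head p : Nat) (commands : List String),
    1 ≤ p → NoDesc (s.drop head) 1 p →
    loopA fuel (s.drop head) commands = loopB fuel s head (descentFrom s head p) commands := by
  induction fuel with
  | zero => intro s head p commands _ _; rfl
  | succ fuel ih =>
    intro s head p commands hp hnd
    have hdf : descentFrom s head p = innerA (s.drop head) p := descentFrom_eq_innerA s head p hp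
    have hskip : innerA (s.drop head) 1 = innerA (s.drop head) p := innerA_skip _ 1 p hp hnd
    rcases e : innerA (s.drop head) p with _ | j
    · -- no descent: A sees a sorted list, B's scan returns none
      have h1 : innerA (s.drop head) 1 = none := hskip.trans e
      have hs : s.drop head = PySem.List.sorted (s.drop head) (fun x => x) false :=
        (sorted_self_iff _).mpr h1
      rw [hdf, e]
      show loopA (fuel + 1) (s.drop head) commands = commands
      unfold loopA
      simp [← hs]
    · -- first descent at j
      have h1 : innerA (s.drop head) 1 = some j := hskip.trans e
      obtain ⟨hj1, hjlen, hjd, hjnd⟩ := innerA_some _ 1 j h1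
      have hns : ¬ s.drop head = PySem.List.sorted (s.drop head) (fun x => x) false := by
        intro hc
        rw [(sorted_self_iff _).mp hc] at h1
        exact absurd h1 (by simp)
      have hlen : head + j < s.length := by
        have h := hjlen
        rw [List.length_drop] at h
        omega
      rw [hdf, e]
      show loopA (fuel + 1) (s.drop head) commands
          = loopB (fuel + 1) s head (some j) commands
      unfold loopA loopB
      simp only [hns, if_false]
      by_cases hj : j = 1
      · -- MOVE step
        subst hj
        have hd1 : (s.drop head).getD 0 0 > (s.drop head).getD 1 0 := by
          simpa using hjd
        simp only [hd1, if_true]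
        have hhead : head < s.length := by omega
        have hx : s.getD head 0 = (s.drop head).getD 0 0 := (getD_drop s head 0 (by omega)).symm
        have htail : ((s ++ [s.getD head 0]).drop (head + 1)) =
            ((s.drop head) ++ [(s.drop head).getD 0 0]).tail := by
          rw [List.drop_append_of_le_length (by omega), hx]
          rcases hsd : s.drop head with _ | ⟨x, xs⟩
          · exfalso; have hl := congrArg List.length hsd
            rw [List.length_drop] at hl; simp at hl; omega
          · have hxs : s.drop (head + 1) = xs := by
              have h3 : (s.drop head).tail = s.drop (head + 1) := List.tail_drop
              rw [hsd] at h3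
              simpa using h3.symm
            simp [hxs]
        have := ih (s ++ [s.getD head 0]) (head + 1) 1 (commands ++ ["MOVE"]) le_rfl
          (fun k hk1 hk2 => by omega)
        rw [htail] at this
        exact this
      · -- SWAP step
        have hj2 : 2 ≤ j := by omega
        have hnd1 : ¬ (s.drop head).getD 1 0 < (s.drop head).getD 0 0 := by
          have := hjnd 1 le_rfl (by omega)
          simpa using this
        simp only [gt_iff_lt, hnd1, if_false, h1, hj, if_false]
        have ha1 : head + j - 1 = head + (j - 1) := by omega
        have ev1 : s.getD (head + j) 0 = (s.drop head).getD j 0 := (getD_drop s head j hlen).symm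
        have ev2 : s.getD (head + j - 1) 0 = (s.drop head).getD (j - 1) 0 := by
          rw [ha1, getD_drop s head (j - 1) (by omega)]
        have hdropset :
            ((s.set (head + j - 1) (s.getD (head + j) 0)).set (head + j) (s.getD (head + j - 1) 0)).drop head
            = ((s.drop head).set (j - 1) ((s.drop head).getD j 0)).set j ((s.drop head).getD (j - 1) 0) := by
          rw [drop_set_of_le _ _ _ _ (by omega), drop_set_of_le _ _ _ _ (by omega)]
          rw [ev1, ev2]
          congr 2 <;> omega
        have hinv : NoDesc (((s.drop head).set (j - 1) ((s.drop head).getD j 0)).set j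
            ((s.drop head).getD (j - 1) 0)) 1 (j - 1) := by
          intro k hk1 hk2
          have hk : k ≠ j := by omega
          have hk' : k ≠ j - 1 := by omega
          have hk1' : k - 1 ≠ j := by omega
          have hk2' : k - 1 ≠ j - 1 := by omega
          have eg : ∀ m, m ≠ j → m ≠ j - 1 →
              (((s.drop head).set (j - 1) ((s.drop head).getD j 0)).set j
                ((s.drop head).getD (j - 1) 0)).getD m 0 = (s.drop head).getD m 0 := by
            intro m hm1 hm2
            simp [List.getD_eq_getElem?_getD,
              List.getElem?_set_ne (Ne.symm hm1), List.getElem?_set_ne (Ne.symm hm2)]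
          rw [eg k hk hk', eg (k - 1) hk1' hk2']
          exact hjnd k hk1 (by omega)
        have := ih (((s.set (head + j - 1) (s.getD (head + j) 0)).set (head + j)
            (s.getD (head + j - 1) 0))) head (j - 1) (commands ++ ["SWAP"]) (by omega)
            (by rw [hdropset]; exact hinv)
        rw [hdropset] at this
        exact this

theorem pairwise_range_t (t : List Int) :
    (PySem.List.pyRange 1 ((t.length : Int) + 1) 1).Pairwise (· ≤ ·) := by
  exact (PySem.List.pairwise_lt_pyRange_one _ _).imp (fun h => le_of_lt h)

theorem solve_spec' : ∀ (t : List Int), ¬ D_solve t → solve t = solve_alt t := by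
  intro t hD
  have hsolveA : solve t =
      (if t = PySem.List.pyRange 1 ((t.length : Int) + 1) 1 then []
       else if t.length = 2 then ["SWAP"] else loopA (fuelGuard t) t []) := rfl
  have hd0 : t.drop 0 = t := List.drop_zero
  have hdf1 : descentFrom t 0 1 = innerA t 1 := by
    rw [descentFrom_eq_innerA t 0 1 le_rfl, hd0]
  rw [hsolveA]
  unfold solve_alt
  rw [hdf1]
  by_cases hR : t = PySem.List.pyRange 1 ((t.length : Int) + 1) 1
  · -- already 1..n: both return []
    have hpair : t.Pairwise (· ≤ ·) := by
      have h := pairwise_range_t t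
      rw [← hR] at h
      exact h
    have hnone : innerA t 1 = none :=
      (innerA_none_iff t 1).mpr ((noDesc_iff_pairwise t).mpr hpair)
    rw [if_pos hR, hnone]
  · rw [if_neg hR]
    by_cases h2 : t.length = 2
    · -- length 2, not [1,2]: A swaps unconditionally; B finds the descent at 1
      rw [if_pos h2]
      have hne : t ≠ [1, 2] := fun hc => hR (by rw [hc]; decide)
      have hdesc : t.getD 1 0 < t.getD 0 0 := by
        by_contra hle
        exact hD ⟨h2, by omega, hne⟩
      have hsome : innerA t 1 = some 1 := by
        rw [innerA_eq, if_pos (by omega : 1 < t.length)]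
        rw [if_pos (by simpa using hdesc)]
      rw [hsome]
      show _ = if t.length = 2 then ["SWAP"] else _
      rw [if_pos h2]
    · -- general case
      rw [if_neg h2]
      rcases e : innerA t 1 with _ | j
      · -- sorted: A's while-test fails at once, B's initial scan returns none
        have hs : t = PySem.List.sorted t (fun x => x) false := (sorted_self_iff t).mpr e
        obtain ⟨f, hf⟩ : ∃ f, fuelGuard t = f + 1 :=
          ⟨fuelGuard t - 1, by
            have hpos : 0 < (t.length + 1) ^ 3 := by positivity
            unfold fuelGuard at *
            omega⟩
        rw [hf]
        show (if t = PySem.List.sorted t (fun x => x) false then [] else _) = ([] : List String)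
        rw [if_pos hs]
      · show loopA (fuelGuard t) t [] =
          if t.length = 2 then ["SWAP"] else loopB (fuelGuard t) t 0 (some j) []
        rw [if_neg h2]
        have h := loop_eq (fuelGuard t) t 0 1 [] le_rfl (by rw [hd0]; exact fun k hk1 hk2 => by omega)
        rw [hd0, hdf1, e] at h
        exact h

-- ===== VERDICT (by name: the statement is the Claim_ definition above) =====
theorem solve_spec : Claim_unchanged_solve := by
  intro t _ hD
  exact solve_spec' t hD

theorem solve_changed : Claim_changed_solve := by
  unfold Claim_changed_solve; decide

theorem solve_tight : Claim_exact_solve := by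
  intro t _ hD
  obtain ⟨h2, hle, hne⟩ := hD
  have hnd : NoDesc t 1 t.length := by
    intro j hj1 hj2
    have hj : j = 1 := by omega
    subst hj
    exact not_lt.mpr hle
  have hnone : innerA t 1 = none := (innerA_none_iff t 1).mpr hnd
  have hdfn : descentFrom t 0 1 = none := by
    rw [descentFrom_eq_innerA t 0 1 le_rfl, List.drop_zero]
    exact hnone
  have hB : solve_alt t = [] := by
    unfold solve_alt
    rw [hdfn]
  have hRn : ¬ t = PySem.List.pyRange 1 ((t.length : Int) + 1) 1 := by
    intro hc
    have h3 : ((t.length : Int) + 1) = 3 := by rw [h2]; decide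
    rw [h3] at hc
    exact hne (hc.trans (by decide))
  have hA : solve t = ["SWAP"] := by
    show (if t = PySem.List.pyRange 1 ((t.length : Int) + 1) 1 then []
      else if t.length = 2 then ["SWAP"] else loopA (fuelGuard t) t []) = ["SWAP"]
    rw [if_neg hRn, if_pos h2]
  rw [hA, hB]
  simp
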